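-- pv_equiv track=rewrite | github.com/MazsolasPuding/Python | Exercises/Symetric_difference.py | symetric_difference
-- ===== SOURCE A (Python) =====
-- def symetric_difference(sets):
-- 	result = []
-- 	for i in range(len(sets)):
-- 		for value in sets[i]:
-- 			if value in result:
-- 				result.remove(value)
-- 			else:
-- 				result.append(value)
-- 	return result
-- ===== SOURCE B (Python) =====
-- def symetric_difference(sets):
--     flat = [v for s in sets for v in s]
--     counts = {}
--     for v in flat:
--         counts[v] = counts.get(v, 0) + 1
--     order = list(dict.fromkeys(reversed(flat)))
--     order.reverse()
--     return [v for v in order if counts.get(v, 0) % 2 == 1]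
-- ===== Notes on version B (the rewrite author's own statement) =====
-- stated objective: faster
-- what changed: Replaces A's per-element toggle on a list (linear membership test and remove per element) with a staged count-and-filter pipeline: flatten once, build an occurrence counter, dedup the reversed stream to get last-occurrence order, and keep exactly the elements whose total count is odd.
import Mathlib
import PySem

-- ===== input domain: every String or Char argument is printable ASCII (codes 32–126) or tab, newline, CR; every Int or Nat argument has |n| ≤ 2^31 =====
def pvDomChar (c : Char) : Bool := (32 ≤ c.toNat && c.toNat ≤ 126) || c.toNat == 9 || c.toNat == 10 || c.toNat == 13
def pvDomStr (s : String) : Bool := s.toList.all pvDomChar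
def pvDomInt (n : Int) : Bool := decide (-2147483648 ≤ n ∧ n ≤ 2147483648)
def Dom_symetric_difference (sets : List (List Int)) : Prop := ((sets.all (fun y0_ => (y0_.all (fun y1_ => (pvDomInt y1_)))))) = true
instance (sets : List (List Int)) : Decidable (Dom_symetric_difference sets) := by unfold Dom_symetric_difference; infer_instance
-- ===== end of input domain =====

-- B replaces A's per-element toggle loop by a count-and-filter pipeline: count all occurrences,
-- dedup the reversed stream for last-occurrence order, keep the odd-count elements (faster, asymptotic).


-- ===== PORT A =====
-- one iteration of A's inner body: toggle `value` in the result list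
def pyToggle (result : List Int) (value : Int) : List Int :=
  if value ∈ result then (PySem.List.remove? result value).getD result
  else result ++ [value]

def symetric_difference (sets : List (List Int)) : List Int :=
  sets.foldl (fun result s => s.foldl pyToggle result) []

-- ===== PORT B =====
-- counts = occurrence dict; order = list(dict.fromkeys(reversed(flat))) reversed; keep odd counts
def symetric_difference_alt (sets : List (List Int)) : List Int :=
  let flat := sets.flatMap (fun s => s)
  let counts := flat.foldl (fun d v => d.insert v (d.getD v 0 + 1)) (PySem.Dict.empty : PySem.Dict Int Int)
  let order := (PySem.List.dedup flat.reverse).reverse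
  order.filter (fun v => PySem.Int.mod (counts.getD v 0) 2 == 1)

-- ===== PRECONDITION & SPEC =====
def Spec_symetric_difference (sets : List (List Int)) (out : List Int) : Prop := out = symetric_difference_alt sets
instance (sets : List (List Int)) (out : List Int) : Decidable (Spec_symetric_difference sets out) := by unfold Spec_symetric_difference; infer_instance

-- ===== CLAIM (what is proved, stated in full; the proofs are below) =====
def Claim_equal_symetric_difference : Prop := ∀ (sets : List (List Int)), Dom_symetric_difference sets → Spec_symetric_difference sets (symetric_difference sets)

-- ===== LEMMAS AND PROOFS =====

-- the common characterisation: elements with odd total count, in last-occurrence order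
def canonSD (l : List Int) : List Int :=
  ((PySem.Set.ofList l.reverse).reverse).filter (fun v => l.count v % 2 == 1)

theorem mem_canonSD (l : List Int) (v : Int) :
    v ∈ canonSD l ↔ v ∈ l ∧ l.count v % 2 = 1 := by
  simp [canonSD, PySem.Set.mem_ofList]

theorem nodup_canonSD (l : List Int) : (canonSD l).Nodup :=
  (List.nodup_reverse.mpr (PySem.Set.nodup_ofList l.reverse)).filter _

-- A's nested loop is the toggle fold over the flattened stream
theorem fold_flat (sets : List (List Int)) (r : List Int) :
    sets.foldl (fun result s => s.foldl pyToggle result) r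
      = (sets.flatMap (fun s => s)).foldl pyToggle r := by
  induction sets generalizing r with
  | nil => rfl
  | cons s t ih => simp [List.foldl_append, ih]

theorem filter_ne_of_not_mem (l : List Int) (v : Int) (h : v ∉ l) :
    l.filter (fun w => !(w == v)) = l := by
  apply List.filter_eq_self.mpr
  intro a ha
  simp only [Bool.not_eq_true', beq_eq_false_iff_ne]
  exact fun hav => h (hav ▸ ha)

-- appending one element to the stream filters it out and re-appends it iff its new count is odd
theorem canon_append (l : List Int) (v : Int) :
    canonSD (l ++ [v])
      = (canonSD l).filter (fun w => !(w == v))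
        ++ (if (l.count v + 1) % 2 == 1 then [v] else []) := by
  unfold canonSD
  rw [show (l ++ [v]).reverse = v :: l.reverse by simp]
  rw [PySem.Set.ofList_cons]
  simp only [List.reverse_cons, List.filter_append, PySem.Set.discard, List.filter_reverse,
    List.filter_filter]
  congr 1
  · congr 1
    apply List.filter_congr
    intro w hw
    by_cases hwv : w = v
    · simp [hwv]
    · have : (l ++ [v]).count w = l.count w := by
        simp only [List.count_append, List.count_singleton]
        simp [Ne.symm hwv]
      simp [this, Bool.and_comm]
  · by_cases h : (l.count v + 1) % 2 = 1 <;>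
      simp [List.count_singleton, List.count_append, h]

-- one toggle step tracks the characterisation
theorem canon_step (l : List Int) (v : Int) :
    pyToggle (canonSD l) v = canonSD (l ++ [v]) := by
  rw [canon_append, pyToggle]
  by_cases hv : v ∈ canonSD l
  · obtain ⟨hvl, hodd⟩ := (mem_canonSD l v).mp hv
    rw [if_pos hv, PySem.List.remove?_eq_some_erase _ v hv, Option.getD_some,
      (nodup_canonSD l).erase_eq_filter v]
    have : ((l.count v + 1) % 2 == 1) = false := by
      simp only [beq_eq_false_iff_ne]; omega
    simp [this, bne]
  · rw [if_neg hv]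
    have hodd : l.count v % 2 = 0 := by
      by_cases hvl : v ∈ l
      · have h2 := (mem_canonSD l v).not.mp hv
        exact (Nat.mod_two_eq_zero_or_one _).resolve_right (fun h => h2 ⟨hvl, h⟩)
      · simp [List.count_eq_zero_of_not_mem hvl]
    have h1 : (l.count v + 1) % 2 = 1 := by omega
    rw [filter_ne_of_not_mem _ _ hv]
    simp [h1]

theorem toggle_eq_canon (l : List Int) : l.foldl pyToggle [] = canonSD l := by
  induction l using List.reverseRecOn with
  | nil => rfl
  | append_singleton l v ih =>
    rw [List.foldl_append]
    simp only [List.foldl_cons, List.foldl_nil]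
    rw [ih, canon_step]

theorem A_eq_canon (sets : List (List Int)) :
    symetric_difference sets = canonSD (sets.flatMap (fun s => s)) := by
  rw [symetric_difference, fold_flat, toggle_eq_canon]

-- Python %: on a nonnegative count, `mod c 2 == 1` is the Nat parity test
theorem modtwo (c : Nat) : (PySem.Int.mod (c:Int) 2 == 1) = (c % 2 == 1) := by
  rw [PySem.Int.mod_eq_emod_of_pos (by norm_num)]
  rcases Nat.mod_two_eq_zero_or_one c with h | h <;>
  · have h2 : (c:Int) % 2 = (c % 2 : Nat) := by omega
    simp [h2, h]

theorem B_eq_canon (sets : List (List Int)) :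
    symetric_difference_alt sets = canonSD (sets.flatMap (fun s => s)) := by
  unfold symetric_difference_alt canonSD
  simp only [PySem.List.dedup_eq_ofList]
  apply List.filter_congr
  intro v hv
  rw [PySem.Dict.getD_foldl_insert_add_one, PySem.Dict.getD_empty, zero_add]
  exact modtwo _

-- ===== VERDICT (by name: the statement is the Claim_ definition above) =====
theorem symetric_difference_spec : Claim_equal_symetric_difference := by
  intro sets _
  unfold Spec_symetric_difference
  rw [A_eq_canon, B_eq_canon]
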